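-- pv_equiv track=rewrite | github.com/Angela-Park-JE/TIL_ver1 | python3/algorithm_programmers/_043_배열 조각하기.py | solution
-- ===== SOURCE A (Python) =====
-- def solution(arr, query):
--     for i in range(len(query)):
--         if i%2==0:
--             arr = arr[:-1]
--         elif i%2!=0:
--             arr = arr[1:]
--
--     answer = arr
--     return answer
-- ===== SOURCE B (Python) =====
-- def solution(arr, query):
--     q = len(query)
--     front = q // 2
--     back = (q + 1) // 2
--     return arr[front : max(len(arr) - back, 0)]
-- ===== Notes on version B (the rewrite author's own statement) =====
-- stated objective: faster
-- what changed: A trims arr one element at a time (arr[:-1] or arr[1:], each a full copy) for every query index; B counts front/back removals from len(query) in closed form and performs a single slice.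
import Mathlib
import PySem

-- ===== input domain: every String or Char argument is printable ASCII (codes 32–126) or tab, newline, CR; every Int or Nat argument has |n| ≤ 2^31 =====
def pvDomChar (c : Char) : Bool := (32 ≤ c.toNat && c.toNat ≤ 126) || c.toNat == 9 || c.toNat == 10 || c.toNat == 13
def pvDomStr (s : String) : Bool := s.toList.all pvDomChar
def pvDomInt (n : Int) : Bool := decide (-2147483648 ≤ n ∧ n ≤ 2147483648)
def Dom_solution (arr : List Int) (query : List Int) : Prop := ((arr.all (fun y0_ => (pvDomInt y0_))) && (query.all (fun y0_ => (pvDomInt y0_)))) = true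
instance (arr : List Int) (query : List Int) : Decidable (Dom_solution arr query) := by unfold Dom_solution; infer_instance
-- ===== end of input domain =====

-- B replaces A's per-query-index trimming loop by counting front/back removals and slicing once (asymptotically faster).

-- ===== PORT A =====
-- for i in range(len(query)): if i%2==0: arr = arr[:-1]  elif i%2!=0: arr = arr[1:]
def solution (arr : List Int) (query : List Int) : List Int :=
  (PySem.List.pyRange 0 (query.length : Int) 1).foldl
    (fun a i =>
      if PySem.Int.mod i 2 = 0 then PySem.List.slice a none (some (-1))
      else if PySem.Int.mod i 2 ≠ 0 then PySem.List.slice a (some 1) none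
      else a)
    arr

-- ===== PORT B =====
def solution_alt (arr : List Int) (query : List Int) : List Int :=
  let q : Int := (query.length : Int)
  let front : Int := PySem.Int.floordiv q 2
  let back : Int := PySem.Int.floordiv (q + 1) 2
  PySem.List.slice arr (some front) (some (max ((arr.length : Int) - back) 0))

-- ===== PRECONDITION & SPEC =====
def Spec_solution (arr : List Int) (query : List Int) (out : List Int) : Prop := out = solution_alt arr query
instance (arr : List Int) (query : List Int) (out : List Int) : Decidable (Spec_solution arr query out) := by unfold Spec_solution; infer_instance

-- ===== CLAIM (what is proved, stated in full; the proofs are below) =====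
def Claim_equal_solution : Prop := ∀ (arr : List Int) (query : List Int), Dom_solution arr query → Spec_solution arr query (solution arr query)

-- ===== LEMMAS AND PROOFS =====

-- (take t l).dropLast = take (t-1) l when t is within range
theorem dropLast_take_of_le {α : Type} {l : List α} {t : Nat} (h : t ≤ l.length) :
    (l.take t).dropLast = l.take (t - 1) := by
  rw [List.dropLast_eq_take, List.length_take, List.take_take]
  congr 1
  omega

-- tail of a take
theorem tail_take_eq {α : Type} (l : List α) (t : Nat) :
    (l.take t).tail = l.tail.take (t - 1) := by
  cases l with
  | nil => simp
  | cons x xs => cases t <;> simp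

-- A's loop body over range(q): characterisation of the fold after q steps
theorem solution_fold_char (arr : List Int) (q : Nat) :
    (PySem.List.pyRange 0 (q : Int) 1).foldl
      (fun a i =>
        if PySem.Int.mod i 2 = 0 then PySem.List.slice a none (some (-1))
        else if PySem.Int.mod i 2 ≠ 0 then PySem.List.slice a (some 1) none
        else a)
      arr
    = (arr.drop (q / 2)).take (arr.length - (q + 1) / 2 - q / 2) := by
  induction q with
  | zero => simp [PySem.List.pyRange_one_eq_nil]
  | succ n ih =>
    have hcast : ((n + 1 : Nat) : Int) = (n : Int) + 1 := by push_cast; ring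
    rw [hcast, PySem.List.pyRange_one_succ_right (by positivity), List.foldl_append, ih]
    simp only [List.foldl_cons, List.foldl_nil]
    have hmod : PySem.Int.mod (n : Int) 2 = ((n % 2 : Nat) : Int) :=
      PySem.Int.mod_natCast n 2
    rcases Nat.even_or_odd n with he | ho
    · -- n even: remove last element
      have h2 : n % 2 = 0 := Nat.even_iff.mp he
      rw [hmod, h2]
      norm_num
      rw [PySem.List.slice_to_neg_one, dropLast_take_of_le (by simp; omega)]
      rw [show (n + 1 + 1) / 2 = n / 2 + 1 from by omega,
          show (n + 1) / 2 = n / 2 from by omega]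
      congr 1
      omega
    · -- n odd: remove first element
      have h2 : n % 2 = 1 := Nat.odd_iff.mp ho
      rw [hmod, h2]
      norm_num
      rw [PySem.List.slice_from_one, tail_take_eq, List.tail_drop]
      rw [show (n + 1 + 1) / 2 = n / 2 + 1 from by omega,
          show (n + 1) / 2 = n / 2 + 1 from by omega]
      congr 1

theorem solution_alt_char (arr : List Int) (query : List Int) :
    solution_alt arr query
    = (arr.drop (query.length / 2)).take (arr.length - (query.length + 1) / 2 - query.length / 2) := by
  unfold solution_alt
  have hf : PySem.Int.floordiv ((query.length : Int)) 2 = ((query.length / 2 : Nat) : Int) := by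
    exact_mod_cast PySem.Int.floordiv_natCast query.length 2
  have hb : PySem.Int.floordiv ((query.length : Int) + 1) 2 = (((query.length + 1) / 2 : Nat) : Int) := by
    have := PySem.Int.floordiv_natCast (query.length + 1) 2
    push_cast at this ⊢
    exact this
  simp only [hf, hb]
  set n := arr.length
  set f := query.length / 2
  set b := (query.length + 1) / 2
  have hmax : max ((n : Int) - (b : Int)) 0 = ((n - b : Nat) : Int) := by
    omega
  rw [hmax, PySem.List.slice_natCast]

-- ===== VERDICT (by name: the statement is the Claim_ definition above) =====
theorem solution_spec : Claim_equal_solution := by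
  intro arr query _
  unfold Spec_solution solution
  exact (solution_fold_char arr query.length).trans (solution_alt_char arr query).symm
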